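-- pv_equiv track=rewrite | github.com/coralmess/grotesk_bot_tg | tsek_bot/bot.py | shift_intervals
-- ===== SOURCE A (Python) =====
-- from typing import Dict, List, Tuple
--
-- def shift_intervals(intervals: List[Tuple[int, int]], offset: int) -> List[Tuple[int, int]]:
--     shifted: List[Tuple[int, int]] = []
--     for start, end in intervals:
--         length = end - start
--         if length <= 0:
--             continue
--         new_start = start + offset
--         new_end = new_start + length
--         shifted.append((new_start, new_end))
--     return normalize_intervals(shifted)
--
-- def normalize_intervals(intervals: List[Tuple[int, int]]) -> List[Tuple[int, int]]:
--     cleaned = []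
--     for start, end in intervals:
--         if end <= start:
--             continue
--         cleaned.append((start, end))
--     cleaned.sort(key=lambda x: x[0])
--     merged: List[Tuple[int, int]] = []
--     for start, end in cleaned:
--         if not merged:
--             merged.append((start, end))
--             continue
--         last_start, last_end = merged[-1]
--         if start <= last_end:
--             merged[-1] = (last_start, max(last_end, end))
--         else:
--             merged.append((start, end))
--     return merged
-- ===== SOURCE B (Python) =====
-- def shift_intervals(intervals, offset):
--     # Incremental interval-set insertion: no sort, fold each shifted interval
--     # into a maintained disjoint sorted list.
--     merged = []
--     for start, end in intervals:
--         if end <= start: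
--             continue
--         s, e = start + offset, end + offset
--         before = [p for p in merged if p[1] < s]
--         after = [p for p in merged if p[0] > e]
--         mid = [p for p in merged if p[1] >= s and p[0] <= e]
--         ns = min([s] + [p[0] for p in mid])
--         ne = max([e] + [p[1] for p in mid])
--         merged = before + [(ns, ne)] + after
--     return merged
-- ===== Notes on version B (the rewrite author's own statement) =====
-- stated objective: alternative
-- what changed: Instead of collecting all shifted intervals, sorting them and merging neighbours in one scan, B keeps a disjoint sorted interval set and folds each shifted interval into it incrementally (partition into before/overlapping/after, collapse the overlapping block) with no sort at all.
import Mathlib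
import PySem

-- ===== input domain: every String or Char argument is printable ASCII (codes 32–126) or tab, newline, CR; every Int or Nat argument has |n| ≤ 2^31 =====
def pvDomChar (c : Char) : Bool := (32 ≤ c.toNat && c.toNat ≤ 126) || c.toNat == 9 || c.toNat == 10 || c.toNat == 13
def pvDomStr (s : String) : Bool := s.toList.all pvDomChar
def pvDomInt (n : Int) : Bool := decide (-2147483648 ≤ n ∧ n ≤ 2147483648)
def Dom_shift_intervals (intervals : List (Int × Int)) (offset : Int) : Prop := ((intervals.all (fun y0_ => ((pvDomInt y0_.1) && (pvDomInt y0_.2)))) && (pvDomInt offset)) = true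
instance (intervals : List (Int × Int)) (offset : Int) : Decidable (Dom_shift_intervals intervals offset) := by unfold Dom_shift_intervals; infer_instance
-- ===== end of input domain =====

-- B replaces A's collect-sort-merge by an incremental disjoint-interval-set insertion (no sort); alternative decomposition, same results.

-- ===== PORT A =====
-- the merge loop of normalize_intervals: Python appends to `merged` and mutates merged[-1];
-- ported with the accumulator kept in reverse (head = merged[-1]), reversed at the end.
def pyMergeLoop : List (Int × Int) → List (Int × Int) → List (Int × Int)
  | acc, [] => acc.reverse
  | [], (s, e) :: xs => pyMergeLoop [(s, e)] xs
  | (ls, le) :: t, (s, e) :: xs =>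
      if s ≤ le then pyMergeLoop ((ls, max le e) :: t) xs
      else pyMergeLoop ((s, e) :: (ls, le) :: t) xs

def normalize_intervals (intervals : List (Int × Int)) : List (Int × Int) :=
  let cleaned := intervals.foldl (fun acc p => if p.2 ≤ p.1 then acc else acc ++ [p]) []
  let sortedL := PySem.List.sorted cleaned (fun p => p.1) false
  pyMergeLoop [] sortedL

def shift_intervals (intervals : List (Int × Int)) (offset : Int) : List (Int × Int) :=
  let shifted := intervals.foldl (fun acc p =>
      let length := p.2 - p.1
      if length ≤ 0 then acc
      else acc ++ [(p.1 + offset, p.1 + offset + length)]) []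
  normalize_intervals shifted

-- ===== PORT B =====
def bInsert (merged : List (Int × Int)) (s e : Int) : List (Int × Int) :=
  let before := merged.filter (fun p => decide (p.2 < s))
  let after := merged.filter (fun p => decide (e < p.1))
  let mid := merged.filter (fun p => decide (s ≤ p.2) && decide (p.1 ≤ e))
  let ns := mid.foldl (fun a p => min a p.1) s
  let ne := mid.foldl (fun a p => max a p.2) e
  before ++ (ns, ne) :: after

def shift_intervals_alt (intervals : List (Int × Int)) (offset : Int) : List (Int × Int) :=
  intervals.foldl (fun merged p =>
    if p.2 ≤ p.1 then merged
    else bInsert merged (p.1 + offset) (p.2 + offset)) []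

-- ===== PRECONDITION & SPEC =====
def Spec_shift_intervals (intervals : List (Int × Int)) (offset : Int) (out : List (Int × Int)) : Prop := out = shift_intervals_alt intervals offset
instance (intervals : List (Int × Int)) (offset : Int) (out : List (Int × Int)) : Decidable (Spec_shift_intervals intervals offset out) := by unfold Spec_shift_intervals; infer_instance

-- ===== CLAIM (what is proved, stated in full; the proofs are below) =====
def Claim_equal_shift_intervals : Prop := ∀ (intervals : List (Int × Int)) (offset : Int), Dom_shift_intervals intervals offset → Spec_shift_intervals intervals offset (shift_intervals intervals offset)

-- ===== LEMMAS AND PROOFS =====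

-- x is covered by some interval of M (half-open [start, end))
def covered (M : List (Int × Int)) (x : Int) : Prop := ∃ p ∈ M, p.1 ≤ x ∧ x < p.2

-- normal form: nonempty intervals, sorted and pairwise separated by a gap
def NF (M : List (Int × Int)) : Prop :=
  M.Pairwise (fun p q => p.2 < q.1) ∧ ∀ p ∈ M, p.1 < p.2

-- semantics of the original input: x covered by some shifted valid interval
def coveredS (L : List (Int × Int)) (off x : Int) : Prop :=
  ∃ p ∈ L, p.1 < p.2 ∧ p.1 + off ≤ x ∧ x < p.2 + off

theorem covered_cons (p : Int × Int) (M : List (Int × Int)) (x : Int) :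
    covered (p :: M) x ↔ (p.1 ≤ x ∧ x < p.2) ∨ covered M x := by
  simp [covered]

theorem covered_cons' (a b : Int) (M : List (Int × Int)) (x : Int) :
    covered ((a, b) :: M) x ↔ (a ≤ x ∧ x < b) ∨ covered M x := by
  simp [covered]

theorem covered_nil (x : Int) : ¬ covered [] x := by simp [covered]

theorem covered_of_mem_iff {M N : List (Int × Int)} (h : ∀ p, p ∈ M ↔ p ∈ N) (x : Int) :
    covered M x ↔ covered N x := by
  unfold covered
  constructor
  · rintro ⟨p, hp, hx⟩; exact ⟨p, (h p).mp hp, hx⟩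
  · rintro ⟨p, hp, hx⟩; exact ⟨p, (h p).mpr hp, hx⟩

theorem NF_min_start {s e : Int} {T : List (Int × Int)} (h : NF ((s, e) :: T)) {x : Int}
    (hc : covered ((s, e) :: T) x) : s ≤ x := by
  rcases (covered_cons _ _ _).mp hc with ⟨h1, _⟩ | ⟨q, hq, hq1, _⟩
  · exact h1
  · have := (List.pairwise_cons.mp h.1).1 q hq
    have := h.2 (s, e) (by simp)
    simp at this
    omega

theorem NF_not_covered_end {s e : Int} {T : List (Int × Int)} (h : NF ((s, e) :: T)) :
    ¬ covered ((s, e) :: T) e := by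
  intro hc
  rcases (covered_cons _ _ _).mp hc with ⟨_, h2⟩ | ⟨q, hq, hq1, _⟩
  · omega
  · have := (List.pairwise_cons.mp h.1).1 q hq
    simp at this
    omega

theorem NF_tail {p : Int × Int} {T : List (Int × Int)} (h : NF (p :: T)) : NF T :=
  ⟨(List.pairwise_cons.mp h.1).2, fun q hq => h.2 q (List.mem_cons_of_mem _ hq)⟩

theorem covered_tail_gt {s e : Int} {T : List (Int × Int)} (h : NF ((s, e) :: T)) {x : Int}
    (hc : covered T x) : e < x := by
  rcases hc with ⟨q, hq, hq1, _⟩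
  have := (List.pairwise_cons.mp h.1).1 q hq
  simp at this
  omega

-- normal forms covering the same set are equal
theorem NF_unique : ∀ (M N : List (Int × Int)), NF M → NF N →
    (∀ x, covered M x ↔ covered N x) → M = N := by
  intro M
  induction M with
  | nil =>
    intro N _ hN hcov
    cases N with
    | nil => rfl
    | cons q T =>
      exfalso
      have hv := hN.2 q (by simp)
      have : covered (q :: T) q.1 := ⟨q, by simp, le_refl _, hv⟩
      exact (covered_nil q.1) ((hcov q.1).mpr this)
  | cons p M' ih =>
    intro N hM hN hcov
    cases N with
    | nil =>
      exfalso
      have hv := hM.2 p (by simp)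
      have : covered (p :: M') p.1 := ⟨p, by simp, le_refl _, hv⟩
      exact (covered_nil p.1) ((hcov p.1).mp this)
    | cons q N' =>
      obtain ⟨s1, e1⟩ := p
      obtain ⟨s2, e2⟩ := q
      have hv1 : s1 < e1 := by have := hM.2 (s1, e1) (by simp); simpa using this
      have hv2 : s2 < e2 := by have := hN.2 (s2, e2) (by simp); simpa using this
      have hs12 : s2 ≤ s1 :=
        NF_min_start hN ((hcov s1).mp ⟨(s1, e1), by simp, le_refl _, hv1⟩)
      have hs21 : s1 ≤ s2 :=
        NF_min_start hM ((hcov s2).mpr ⟨(s2, e2), by simp, le_refl _, hv2⟩)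
      have hs : s1 = s2 := le_antisymm hs21 hs12
      have he12 : ¬ e1 < e2 := by
        intro hlt
        exact NF_not_covered_end hM ((hcov e1).mpr ⟨(s2, e2), by simp, by omega, by simpa⟩)
      have he21 : ¬ e2 < e1 := by
        intro hlt
        exact NF_not_covered_end hN ((hcov e2).mp ⟨(s1, e1), by simp, by omega, by simpa⟩)
      have he : e1 = e2 := by omega
      subst hs; subst he
      have htail : ∀ x, covered M' x ↔ covered N' x := by
        intro x
        constructor
        · intro hx
          have hgt := covered_tail_gt hM hx
          have : covered ((s1, e1) :: N') x :=
            (hcov x).mp ((covered_cons _ _ _).mpr (Or.inr hx))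
          rcases (covered_cons _ _ _).mp this with ⟨_, h2⟩ | h
          · simp at h2; omega
          · exact h
        · intro hx
          have hgt := covered_tail_gt hN hx
          have : covered ((s1, e1) :: M') x :=
            (hcov x).mpr ((covered_cons _ _ _).mpr (Or.inr hx))
          rcases (covered_cons _ _ _).mp this with ⟨_, h2⟩ | h
          · simp at h2; omega
          · exact h
      rw [ih N' (NF_tail hM) (NF_tail hN) htail]

-- either order of the separation relation holds between two distinct members of an NF list
theorem NF_rel_or {M : List (Int × Int)} (h : M.Pairwise (fun p q => p.2 < q.1))
    {p q : Int × Int} (hp : p ∈ M) (hq : q ∈ M) (hne : p ≠ q) :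
    p.2 < q.1 ∨ q.2 < p.1 := by
  have hsym : M.Pairwise (fun p q : Int × Int => p.2 < q.1 ∨ q.2 < p.1) :=
    h.imp (fun hr => Or.inl hr)
  exact hsym.forall (fun a b hab => hab.symm) hp hq hne

theorem foldl_min_le (L : List (Int × Int)) (a : Int) :
    L.foldl (fun a p => min a p.1) a ≤ a ∧ ∀ p ∈ L, L.foldl (fun a p => min a p.1) a ≤ p.1 := by
  induction L generalizing a with
  | nil => simp
  | cons q T ih =>
    have := ih (min a q.1)
    constructor
    · simp only [List.foldl_cons]; omega
    · intro p hp
      rcases List.mem_cons.mp hp with rfl | hp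
      · simp only [List.foldl_cons]; omega
      · exact this.2 p hp

theorem foldl_min_mem (L : List (Int × Int)) (a : Int) :
    L.foldl (fun a p => min a p.1) a = a ∨ ∃ p ∈ L, L.foldl (fun a p => min a p.1) a = p.1 := by
  induction L generalizing a with
  | nil => simp
  | cons q T ih =>
    rcases ih (min a q.1) with h | ⟨p, hp, hv⟩
    · simp only [List.foldl_cons] at *
      rcases le_or_gt a q.1 with hle | hlt
      · left; omega
      · right; exact ⟨q, by simp, by omega⟩
    · right; exact ⟨p, by simp [hp], by simpa using hv⟩

theorem foldl_max_ge (L : List (Int × Int)) (a : Int) :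
    a ≤ L.foldl (fun a p => max a p.2) a ∧ ∀ p ∈ L, p.2 ≤ L.foldl (fun a p => max a p.2) a := by
  induction L generalizing a with
  | nil => simp
  | cons q T ih =>
    have := ih (max a q.2)
    constructor
    · simp only [List.foldl_cons]; omega
    · intro p hp
      rcases List.mem_cons.mp hp with rfl | hp
      · simp only [List.foldl_cons]; omega
      · exact this.2 p hp

theorem foldl_max_mem (L : List (Int × Int)) (a : Int) :
    L.foldl (fun a p => max a p.2) a = a ∨ ∃ p ∈ L, L.foldl (fun a p => max a p.2) a = p.2 := by
  induction L generalizing a with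
  | nil => simp
  | cons q T ih =>
    rcases ih (max a q.2) with h | ⟨p, hp, hv⟩
    · simp only [List.foldl_cons] at *
      rcases le_or_gt q.2 a with hle | hlt
      · left; omega
      · right; exact ⟨q, by simp, by omega⟩
    · right; exact ⟨p, by simp [hp], by simpa using hv⟩

-- inserting [s, e) into an NF list keeps NF and adds exactly [s, e) to the covered set
theorem bInsert_char {M : List (Int × Int)} (hM : NF M) {s e : Int} (hse : s < e) :
    NF (bInsert M s e) ∧ ∀ x, (covered (bInsert M s e) x ↔ covered M x ∨ (s ≤ x ∧ x < e)) := by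
  unfold bInsert
  set before := M.filter (fun p => decide (p.2 < s)) with hbef
  set after := M.filter (fun p => decide (e < p.1)) with haft
  set mid := M.filter (fun p => decide (s ≤ p.2) && decide (p.1 ≤ e)) with hmid
  set ns := mid.foldl (fun a p => min a p.1) s with hns
  set ne := mid.foldl (fun a p => max a p.2) e with hne
  have hbefP : ∀ p ∈ before, p ∈ M ∧ p.2 < s := by
    intro p hp; have := List.mem_filter.mp hp; simpa using this
  have haftP : ∀ p ∈ after, p ∈ M ∧ e < p.1 := by
    intro p hp; have := List.mem_filter.mp hp; simpa using this
  have hmidP : ∀ p ∈ mid, p ∈ M ∧ s ≤ p.2 ∧ p.1 ≤ e := by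
    intro p hp; have := List.mem_filter.mp hp; simpa using this
  have hsplit : ∀ p ∈ M, p ∈ before ∨ p ∈ mid ∨ p ∈ after := by
    intro p hp
    by_cases h1 : p.2 < s
    · left; exact List.mem_filter.mpr ⟨hp, by simpa⟩
    · by_cases h2 : e < p.1
      · right; right; exact List.mem_filter.mpr ⟨hp, by simpa⟩
      · right; left; exact List.mem_filter.mpr ⟨hp, by simp; omega⟩
  have hnsle := foldl_min_le mid s
  have hnsmem := foldl_min_mem mid s
  have hnege := foldl_max_ge mid e
  have hnemem := foldl_max_mem mid e
  rw [← hns] at hnsle hnsmem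
  rw [← hne] at hnege hnemem
  -- cross facts
  have hbef_ns : ∀ p ∈ before, p.2 < ns := by
    intro p hp
    obtain ⟨hpM, hps⟩ := hbefP p hp
    rcases hnsmem with h | ⟨m, hm, hv⟩
    · omega
    · obtain ⟨hmM, hms, hme⟩ := hmidP m hm
      have hne' : p ≠ m := by intro h; subst h; omega
      rcases NF_rel_or hM.1 hpM hmM hne' with h | h
      · omega
      · have := hM.2 p hpM; omega
  have hne_aft : ∀ q ∈ after, ne < q.1 := by
    intro q hq
    obtain ⟨hqM, hqe⟩ := haftP q hq
    rcases hnemem with h | ⟨m, hm, hv⟩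
    · omega
    · obtain ⟨hmM, hms, hme⟩ := hmidP m hm
      have hne' : m ≠ q := by intro h; subst h; omega
      rcases NF_rel_or hM.1 hmM hqM hne' with h | h
      · omega
      · have := hM.2 q hqM; omega
  constructor
  · -- NF of the result
    constructor
    · apply List.pairwise_append.mpr
      refine ⟨hM.1.sublist List.filter_sublist, ?_, ?_⟩
      · apply List.pairwise_cons.mpr
        exact ⟨fun q hq => hne_aft q hq, hM.1.sublist List.filter_sublist⟩
      · intro p hp q hq
        rcases List.mem_cons.mp hq with rfl | hq
        · exact hbef_ns p hp
        · obtain ⟨_, h1⟩ := hbefP p hp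
          obtain ⟨_, h2⟩ := haftP q hq
          omega
    · intro p hp
      rcases List.mem_append.mp hp with hp | hp
      · exact hM.2 p (hbefP p hp).1
      · rcases List.mem_cons.mp hp with rfl | hp
        · simp only; omega
        · exact hM.2 p (haftP p hp).1
  · -- covered characterization
    intro x
    constructor
    · intro hc
      rcases hc with ⟨p, hp, hx1, hx2⟩
      rcases List.mem_append.mp hp with hp | hp
      · exact Or.inl ⟨p, (hbefP p hp).1, hx1, hx2⟩
      · rcases List.mem_cons.mp hp with rfl | hp
        · -- x ∈ [ns, ne)
          simp only at hx1 hx2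
          rcases lt_trichotomy x s with hxs | hxs | hxs
          · -- below s: the minimal-start mid interval covers x
            rcases hnsmem with h | ⟨m, hm, hv⟩
            · omega
            · obtain ⟨hmM, hms, hme⟩ := hmidP m hm
              exact Or.inl ⟨m, hmM, by omega, by omega⟩
          · right; omega
          · by_cases hxe : x < e
            · right; omega
            · -- at or above e: the maximal-end mid interval covers x
              rcases hnemem with h | ⟨m, hm, hv⟩
              · omega
              · obtain ⟨hmM, hms, hme⟩ := hmidP m hm
                rcases le_or_gt m.1 x with h1 | h1
                · exact Or.inl ⟨m, hmM, h1, by omega⟩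
                · right; omega
        · exact Or.inl ⟨p, (haftP p hp).1, hx1, hx2⟩
    · intro hc
      rcases hc with ⟨p, hp, hx1, hx2⟩ | ⟨hx1, hx2⟩
      · rcases hsplit p hp with h | h | h
        · exact ⟨p, List.mem_append.mpr (Or.inl h), hx1, hx2⟩
        · refine ⟨(ns, ne), List.mem_append.mpr (Or.inr (List.mem_cons.mpr (Or.inl rfl))), ?_, ?_⟩
          · have := hnsle.2 p h; simp only; omega
          · have := hnege.2 p h; simp only; omega
        · exact ⟨p, List.mem_append.mpr (Or.inr (List.mem_cons_of_mem _ h)), hx1, hx2⟩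
      · exact ⟨(ns, ne), List.mem_append.mpr (Or.inr (List.mem_cons.mpr (Or.inl rfl))),
          by simp only; omega, by simp only; omega⟩

-- B's fold over the raw input maintains NF and accumulates the covered set
theorem alt_fold_char (off : Int) : ∀ (L acc : List (Int × Int)), NF acc →
    NF (L.foldl (fun merged p => if p.2 ≤ p.1 then merged
        else bInsert merged (p.1 + off) (p.2 + off)) acc) ∧
    ∀ x, (covered (L.foldl (fun merged p => if p.2 ≤ p.1 then merged
        else bInsert merged (p.1 + off) (p.2 + off)) acc) x ↔ covered acc x ∨ coveredS L off x) := by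
  intro L
  induction L with
  | nil => intro acc hacc; refine ⟨hacc, fun x => by simp [coveredS]⟩
  | cons p T ih =>
    intro acc hacc
    simp only [List.foldl_cons]
    by_cases hv : p.2 ≤ p.1
    · rw [if_pos hv]
      obtain ⟨h1, h2⟩ := ih acc hacc
      refine ⟨h1, fun x => ?_⟩
      rw [h2 x]
      simp only [coveredS]
      constructor
      · rintro (h | ⟨q, hq, hqs⟩)
        · exact Or.inl h
        · exact Or.inr ⟨q, by simp [hq], hqs⟩
      · rintro (h | ⟨q, hq, hq1, hqs⟩)
        · exact Or.inl h
        · rcases List.mem_cons.mp hq with rfl | hq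
          · omega
          · exact Or.inr ⟨q, hq, hq1, hqs⟩
    · rw [if_neg hv]
      have hse : p.1 + off < p.2 + off := by omega
      obtain ⟨hi1, hi2⟩ := bInsert_char hacc hse
      obtain ⟨h1, h2⟩ := ih _ hi1
      refine ⟨h1, fun x => ?_⟩
      rw [h2 x, hi2 x]
      simp only [coveredS]
      constructor
      · rintro ((h | ⟨hx1, hx2⟩) | ⟨q, hq, hqs⟩)
        · exact Or.inl h
        · exact Or.inr ⟨p, by simp, by omega, hx1, hx2⟩
        · exact Or.inr ⟨q, by simp [hq], hqs⟩
      · rintro (h | ⟨q, hq, hq1, hqs⟩)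
        · exact Or.inl (Or.inl h)
        · rcases List.mem_cons.mp hq with rfl | hq
          · exact Or.inl (Or.inr ⟨hqs.1, hqs.2⟩)
          · exact Or.inr ⟨q, hq, hq1, hqs⟩

-- membership in A's shifted list
theorem shifted_mem (off : Int) : ∀ (L acc : List (Int × Int)) (q : Int × Int),
    q ∈ L.foldl (fun acc p =>
        let length := p.2 - p.1
        if length ≤ 0 then acc
        else acc ++ [(p.1 + off, p.1 + off + length)]) acc ↔
      q ∈ acc ∨ ∃ p ∈ L, p.1 < p.2 ∧ q = (p.1 + off, p.2 + off) := by
  intro L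
  induction L with
  | nil => intro acc q; simp
  | cons p T ih =>
    intro acc q
    simp only [List.foldl_cons]
    by_cases hv : p.2 - p.1 ≤ 0
    · rw [if_pos hv, ih]
      constructor
      · rintro (h | ⟨r, hr, hrs⟩)
        · exact Or.inl h
        · exact Or.inr ⟨r, by simp [hr], hrs⟩
      · rintro (h | ⟨r, hr, hr1, hrs⟩)
        · exact Or.inl h
        · rcases List.mem_cons.mp hr with rfl | hr
          · omega
          · exact Or.inr ⟨r, hr, hr1, hrs⟩
    · rw [if_neg hv, ih]
      constructor
      · rintro (h | ⟨r, hr, hrs⟩)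
        · rcases List.mem_append.mp h with h | h
          · exact Or.inl h
          · right
            refine ⟨p, by simp, by omega, ?_⟩
            rw [List.mem_singleton.mp h]
            rw [show p.1 + off + (p.2 - p.1) = p.2 + off by omega]
        · exact Or.inr ⟨r, by simp [hr], hrs⟩
      · rintro (h | ⟨r, hr, hr1, hrs⟩)
        · exact Or.inl (List.mem_append.mpr (Or.inl h))
        · rcases List.mem_cons.mp hr with rfl | hr
          · left
            apply List.mem_append.mpr
            right
            simp [hrs]
            omega
          · exact Or.inr ⟨r, hr, hr1, hrs⟩

-- membership in normalize's cleaned list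
theorem cleaned_mem : ∀ (L acc : List (Int × Int)) (q : Int × Int),
    q ∈ L.foldl (fun acc p => if p.2 ≤ p.1 then acc else acc ++ [p]) acc ↔
      q ∈ acc ∨ (q ∈ L ∧ q.1 < q.2) := by
  intro L
  induction L with
  | nil => intro acc q; simp
  | cons p T ih =>
    intro acc q
    simp only [List.foldl_cons]
    by_cases hv : p.2 ≤ p.1
    · rw [if_pos hv, ih]
      constructor
      · rintro (h | ⟨h1, h2⟩)
        · exact Or.inl h
        · exact Or.inr ⟨by simp [h1], h2⟩
      · rintro (h | ⟨h1, h2⟩)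
        · exact Or.inl h
        · rcases List.mem_cons.mp h1 with rfl | h1
          · omega
          · exact Or.inr ⟨h1, h2⟩
    · rw [if_neg hv, ih]
      constructor
      · rintro (h | ⟨h1, h2⟩)
        · rcases List.mem_append.mp h with h | h
          · exact Or.inl h
          · simp at h; subst h; exact Or.inr ⟨by simp, by omega⟩
        · exact Or.inr ⟨by simp [h1], h2⟩
      · rintro (h | ⟨h1, h2⟩)
        · exact Or.inl (List.mem_append.mpr (Or.inl h))
        · rcases List.mem_cons.mp h1 with rfl | h1
          · exact Or.inl (List.mem_append.mpr (Or.inr (List.mem_cons.mpr (Or.inl rfl))))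
          · exact Or.inr ⟨h1, h2⟩

-- A's merge loop: starting from a reversed NF accumulator, over a start-sorted valid list
theorem mergeLoop_char : ∀ (xs acc : List (Int × Int)),
    xs.Pairwise (fun a b => a.1 ≤ b.1) → (∀ p ∈ xs, p.1 < p.2) →
    acc.Pairwise (fun p q => q.2 < p.1) → (∀ p ∈ acc, p.1 < p.2) →
    (∀ h t, acc = h :: t → ∀ q ∈ xs, h.1 ≤ q.1) →
    NF (pyMergeLoop acc xs) ∧
    ∀ x, (covered (pyMergeLoop acc xs) x ↔ covered acc x ∨ covered xs x) := by
  intro xs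
  induction xs with
  | nil =>
    intro acc _ _ hap hav _
    constructor
    · refine ⟨?_, ?_⟩
      · cases acc with
        | nil => simp [pyMergeLoop]
        | cons a t =>
          show (pyMergeLoop (a :: t) []).Pairwise _
          simp only [pyMergeLoop]
          exact (List.pairwise_reverse).mpr hap
      · intro p hp
        cases acc with
        | nil => simp [pyMergeLoop] at hp
        | cons a t =>
          simp only [pyMergeLoop] at hp
          exact hav p (List.mem_reverse.mp hp)
    · intro x
      have hrev : covered (pyMergeLoop acc []) x ↔ covered acc x := by
        cases acc with
        | nil => simp [pyMergeLoop]
        | cons a t =>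
          simp only [pyMergeLoop]
          exact covered_of_mem_iff (fun p => List.mem_reverse) x
      rw [hrev]
      simp [covered_nil]
  | cons hd tl ih =>
    intro acc hsort hval hap hav hhead
    obtain ⟨s, e⟩ := hd
    have hse : s < e := by have := hval (s, e) (by simp); simpa using this
    have hsort' := (List.pairwise_cons.mp hsort).2
    have hsle : ∀ q ∈ tl, s ≤ q.1 := by
      intro q hq; have := (List.pairwise_cons.mp hsort).1 q hq; simpa using this
    have hval' : ∀ p ∈ tl, p.1 < p.2 := fun p hp => hval p (by simp [hp])
    cases acc with
    | nil =>
      show NF (pyMergeLoop [(s, e)] tl) ∧ _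
      have := ih [(s, e)] hsort' hval'
        (by simp) (by intro p hp; simp at hp; subst hp; simpa using hse)
        (by rintro h t ⟨rfl, rfl⟩ q hq; exact hsle q hq)
      obtain ⟨h1, h2⟩ := this
      refine ⟨by simpa [pyMergeLoop] using h1, fun x => ?_⟩
      have : covered (pyMergeLoop [] ((s, e) :: tl)) x ↔ covered [(s, e)] x ∨ covered tl x := by
        simpa [pyMergeLoop] using h2 x
      rw [this, covered_cons, covered_cons]
      simp only [covered_nil, or_false, false_or]
    | cons a t =>
      obtain ⟨ls, le⟩ := a
      have hlsle : ls < le := by have := hav (ls, le) (by simp); simpa using this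
      have hlss : ls ≤ s := by
        have := hhead (ls, le) t rfl (s, e) (by simp); simpa using this
      have htail_lt : ∀ q ∈ t, q.2 < ls := by
        intro q hq; have := (List.pairwise_cons.mp hap).1 q hq; simpa using this
      by_cases hbr : s ≤ le
      · have hstep := ih ((ls, max le e) :: t) hsort' hval'
          (by
            apply List.pairwise_cons.mpr
            exact ⟨fun q hq => by simpa using htail_lt q hq, (List.pairwise_cons.mp hap).2⟩)
          (by
            intro p hp
            rcases List.mem_cons.mp hp with rfl | hp
            · simp only; omega
            · exact hav p (by simp [hp]))
          (by
            rintro h t' ⟨rfl, rfl⟩ q hq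
            have := hsle q hq; simp only; omega)
        obtain ⟨h1, h2⟩ := hstep
        have hunf : pyMergeLoop ((ls, le) :: t) ((s, e) :: tl) =
            pyMergeLoop ((ls, max le e) :: t) tl := by
          simp [pyMergeLoop, hbr]
        rw [hunf]
        refine ⟨h1, fun x => ?_⟩
        rw [h2 x, covered_cons', covered_cons', covered_cons']
        have harith : (ls ≤ x ∧ x < max le e) ↔ (ls ≤ x ∧ x < le) ∨ (s ≤ x ∧ x < e) := by
          constructor
          · rintro ⟨ha, hb⟩
            rcases le_or_gt le x with hx | hx
            · right; constructor <;> omega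
            · left; exact ⟨ha, hx⟩
          · rintro (⟨ha, hb⟩ | ⟨ha, hb⟩) <;> exact ⟨by omega, by omega⟩
        rw [harith]
        tauto
      · have hstep := ih ((s, e) :: (ls, le) :: t) hsort' hval'
          (by
            apply List.pairwise_cons.mpr
            constructor
            · intro q hq
              rcases List.mem_cons.mp hq with rfl | hq
              · simp only; omega
              · have := htail_lt q hq; simp only; omega
            · exact hap)
          (by
            intro p hp
            rcases List.mem_cons.mp hp with rfl | hp
            · simpa using hse
            · exact hav p hp)
          (by
            rintro h t' ⟨rfl, rfl⟩ q hq
            exact hsle q hq)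
        obtain ⟨h1, h2⟩ := hstep
        have hunf : pyMergeLoop ((ls, le) :: t) ((s, e) :: tl) =
            pyMergeLoop ((s, e) :: (ls, le) :: t) tl := by
          simp [pyMergeLoop, hbr]
        rw [hunf]
        refine ⟨h1, fun x => ?_⟩
        rw [h2 x, covered_cons', covered_cons', covered_cons']
        tauto

-- characterization of A's output
theorem A_char (intervals : List (Int × Int)) (off : Int) :
    NF (shift_intervals intervals off) ∧
    ∀ x, (covered (shift_intervals intervals off) x ↔ coveredS intervals off x) := by
  unfold shift_intervals normalize_intervals
  simp only
  set shifted := intervals.foldl (fun acc p =>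
      let length := p.2 - p.1
      if length ≤ 0 then acc
      else acc ++ [(p.1 + off, p.1 + off + length)]) [] with hsh
  set cleaned := shifted.foldl (fun acc p => if p.2 ≤ p.1 then acc else acc ++ [p]) [] with hcl
  set sortedL := PySem.List.sorted cleaned (fun p => p.1) false with hso
  have hshmem : ∀ q, q ∈ shifted ↔ ∃ p ∈ intervals, p.1 < p.2 ∧ q = (p.1 + off, p.2 + off) := by
    intro q
    rw [hsh, shifted_mem]
    simp
  have hshval : ∀ q ∈ shifted, q.1 < q.2 := by
    intro q hq
    obtain ⟨p, _, hp2, rfl⟩ := (hshmem q).mp hq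
    simp only
    omega
  have hclmem : ∀ q, q ∈ cleaned ↔ q ∈ shifted := by
    intro q
    rw [hcl, cleaned_mem]
    simp only [List.not_mem_nil, false_or]
    exact ⟨fun h => h.1, fun h => ⟨h, hshval q h⟩⟩
  have hsomem : ∀ q, q ∈ sortedL ↔ q ∈ shifted := by
    intro q
    rw [hso, PySem.List.mem_sorted]
    exact hclmem q
  have hsoval : ∀ p ∈ sortedL, p.1 < p.2 := fun p hp => hshval p ((hsomem p).mp hp)
  have hsosort : sortedL.Pairwise (fun a b => a.1 ≤ b.1) := PySem.List.sorted_pairwise cleaned (fun p => p.1)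
  obtain ⟨h1, h2⟩ := mergeLoop_char sortedL [] hsosort hsoval (by simp) (by simp)
    (by intro h t h'; simp at h')
  refine ⟨h1, fun x => ?_⟩
  rw [h2 x]
  simp only [covered_nil, false_or]
  constructor
  · rintro ⟨q, hq, hx⟩
    obtain ⟨p, hp, hp2, rfl⟩ := (hshmem q).mp ((hsomem q).mp hq)
    exact ⟨p, hp, hp2, by simpa using hx⟩
  · rintro ⟨p, hp, hp2, hx⟩
    exact ⟨(p.1 + off, p.2 + off), (hsomem _).mpr ((hshmem _).mpr ⟨p, hp, hp2, rfl⟩),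
      by simpa using hx⟩

-- characterization of B's output
theorem B_char (intervals : List (Int × Int)) (off : Int) :
    NF (shift_intervals_alt intervals off) ∧
    ∀ x, (covered (shift_intervals_alt intervals off) x ↔ coveredS intervals off x) := by
  unfold shift_intervals_alt
  obtain ⟨h1, h2⟩ := alt_fold_char off intervals [] ⟨by simp, by simp⟩
  refine ⟨h1, fun x => ?_⟩
  rw [h2 x]
  simp [covered_nil]

-- ===== VERDICT (by name: the statement is the Claim_ definition above) =====
theorem shift_intervals_spec : Claim_equal_shift_intervals := by
  intro intervals offset _
  unfold Spec_shift_intervals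
  obtain ⟨hA1, hA2⟩ := A_char intervals offset
  obtain ⟨hB1, hB2⟩ := B_char intervals offset
  exact NF_unique _ _ hA1 hB1 (fun x => (hA2 x).trans (hB2 x).symm)
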